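-- pv_equiv track=rewrite | github.com/leoapagano/CSE2050 | exam-1-prep/has_any_higher.py | has_any_higher
-- ===== SOURCE A (Python) =====
-- def has_any_higher(L1, L2):
--     """Returns True iff any item in L1 is greater than every item in L2"""
--     for item1 in L1:
--         # boolean flag: item1 > everything in L2
--         has_max = True
--
--         for item2 in L2:
--             # if we find a bigger item, toggle the flag and break
--             if item1 <= item2:
--                 has_max = False
--                 break
--
--         # flag was never toggled - short circuit True
--         if has_max:
--             return True
--
--     return False
-- ===== SOURCE B (Python) =====
-- def has_any_higher(L1, L2):
--     """Returns True iff any item in L1 is greater than every item in L2"""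
--     return bool(L1) and (not L2 or max(L1) > max(L2))
-- ===== Notes on version B (the rewrite author's own statement) =====
-- stated objective: simpler
-- what changed: Replaces the nested short-circuiting scans with a loop-free closed form: L1 nonempty and (L2 empty or max(L1) > max(L2)).
import Mathlib
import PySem

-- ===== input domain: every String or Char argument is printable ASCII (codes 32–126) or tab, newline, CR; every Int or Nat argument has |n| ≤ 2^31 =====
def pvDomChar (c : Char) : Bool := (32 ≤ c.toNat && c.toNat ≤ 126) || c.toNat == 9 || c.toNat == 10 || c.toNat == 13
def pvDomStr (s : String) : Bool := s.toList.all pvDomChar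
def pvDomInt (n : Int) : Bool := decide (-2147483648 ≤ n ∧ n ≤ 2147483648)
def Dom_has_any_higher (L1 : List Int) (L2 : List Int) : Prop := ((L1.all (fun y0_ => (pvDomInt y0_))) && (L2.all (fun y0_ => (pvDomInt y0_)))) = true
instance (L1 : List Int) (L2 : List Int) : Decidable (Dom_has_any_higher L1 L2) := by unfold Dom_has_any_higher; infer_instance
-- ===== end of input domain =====

-- B replaces A's nested short-circuiting scans by the loop-free closed form
-- "L1 nonempty and (L2 empty or max(L1) > max(L2))" (simpler).

-- ===== PORT A =====
-- inner for-loop over L2 with the has_max flag and break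
def hahInner (item1 : Int) : List Int → Bool
  | [] => true
  | item2 :: rest => if item1 ≤ item2 then false else hahInner item1 rest

-- outer for-loop over L1 with the early 'return True'
def hahOuter : List Int → List Int → Bool
  | [], _ => false
  | item1 :: rest, L2 => if hahInner item1 L2 then true else hahOuter rest L2

def has_any_higher (L1 : List Int) (L2 : List Int) : Bool := hahOuter L1 L2

-- ===== PORT B =====
-- bool(L1) and (not L2 or max(L1) > max(L2)); max guarded so it is never taken of []
def has_any_higher_alt (L1 : List Int) (L2 : List Int) : Bool :=
  !L1.isEmpty &&
    (L2.isEmpty ||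
      decide ((PySem.List.max? L1 (fun y => y)).getD 0 > (PySem.List.max? L2 (fun y => y)).getD 0))

-- ===== PRECONDITION & SPEC =====
def Spec_has_any_higher (L1 : List Int) (L2 : List Int) (out : Bool) : Prop := out = has_any_higher_alt L1 L2
instance (L1 : List Int) (L2 : List Int) (out : Bool) : Decidable (Spec_has_any_higher L1 L2 out) := by unfold Spec_has_any_higher; infer_instance

-- ===== CLAIM (what is proved, stated in full; the proofs are below) =====
def Claim_equal_has_any_higher : Prop := ∀ (L1 : List Int) (L2 : List Int), Dom_has_any_higher L1 L2 → Spec_has_any_higher L1 L2 (has_any_higher L1 L2)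

-- ===== LEMMAS AND PROOFS =====
theorem hahInner_iff (x : Int) (L : List Int) : hahInner x L = true ↔ ∀ y ∈ L, y < x := by
  induction L with
  | nil => simp [hahInner]
  | cons b t ih =>
    simp only [hahInner, List.mem_cons]
    split_ifs with h
    · constructor
      · intro hc; exact absurd hc (by simp)
      · intro hall; exact absurd (hall b (Or.inl rfl)) (by omega)
    · rw [ih]
      constructor
      · rintro hall y (rfl | hy)
        · omega
        · exact hall y hy
      · intro hall y hy; exact hall y (Or.inr hy)

theorem hahOuter_iff (L1 L2 : List Int) : hahOuter L1 L2 = true ↔ ∃ x ∈ L1, ∀ y ∈ L2, y < x := by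
  induction L1 with
  | nil => simp [hahOuter]
  | cons a t ih =>
    simp only [hahOuter, List.mem_cons]
    split_ifs with h
    · simp only [true_iff]
      exact ⟨a, Or.inl rfl, (hahInner_iff a L2).mp h⟩
    · rw [ih]
      constructor
      · rintro ⟨x, hx, hall⟩; exact ⟨x, Or.inr hx, hall⟩
      · rintro ⟨x, rfl | hx, hall⟩
        · exact absurd ((hahInner_iff x L2).mpr hall) (by simpa using h)
        · exact ⟨x, hx, hall⟩

-- verdict
theorem has_any_higher_spec : Claim_equal_has_any_higher := by
  unfold Claim_equal_has_any_higher Spec_has_any_higher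
  intro L1 L2 _
  cases L1 with
  | nil => simp [has_any_higher, hahOuter, has_any_higher_alt]
  | cons a t =>
    cases L2 with
    | nil =>
      simp [has_any_higher, has_any_higher_alt, hahOuter, hahInner]
    | cons b s =>
      have hA := hahOuter_iff (a :: t) (b :: s)
      simp only [has_any_higher, has_any_higher_alt, List.isEmpty_cons,
        PySem.List.max?_id_cons, Option.getD_some, Bool.not_false, Bool.true_and,
        Bool.false_or]
      have hM1 := PySem.List.le_foldl_max t a
      have hM1mem := PySem.List.foldl_max_mem t a
      have hM2 := PySem.List.le_foldl_max s b
      have hM2mem := PySem.List.foldl_max_mem s b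
      by_cases hgt : s.foldl max b < t.foldl max a
      · have : hahOuter (a :: t) (b :: s) = true := by
          rw [hA]
          refine ⟨t.foldl max a, ?_, ?_⟩
          · rcases hM1mem with h | h
            · rw [h]; exact List.mem_cons_self
            · exact List.mem_cons_of_mem a h
          · intro y hy
            rcases List.mem_cons.mp hy with rfl | hy
            · omega
            · have := hM2.2 y hy; omega
        simp [this, hgt]
      · have : hahOuter (a :: t) (b :: s) = false := by
          rw [Bool.eq_false_iff]
          intro hc
          rcases hA.mp hc with ⟨x, hx, hall⟩
          have hx1 : x ≤ t.foldl max a := by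
            rcases List.mem_cons.mp hx with rfl | hx
            · exact hM1.1
            · exact hM1.2 x hx
          have hx2 : s.foldl max b < x := by
            rcases hM2mem with h | h
            · rw [h]; exact hall b List.mem_cons_self
            · exact hall _ (List.mem_cons_of_mem b h)
          omega
        simp [this, hgt]
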